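-- pv_equiv track=rewrite | github.com/tranvanloc412/patching | infrastructure/storage/json_handler.py | _get_common_keys
-- ===== SOURCE A (Python) =====
-- from typing import Any, Dict, List, Optional, Union
--
-- def _get_common_keys(data_list: List[Dict[str, Any]]) -> List[str]:
--     """Get common keys from a list of dictionaries."""
--     if not data_list:
--         return []
--
--     # Get keys from first dictionary
--     common_keys = set(data_list[0].keys()) if isinstance(data_list[0], dict) else set()
--
--     # Find intersection with all other dictionaries
--     for item in data_list[1:]:
--         if isinstance(item, dict):
--             common_keys &= set(item.keys())
--         else:
--             common_keys = set()  # No common keys if not all items are dicts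
--             break
--
--     return sorted(list(common_keys))
-- ===== SOURCE B (Python) =====
-- def _get_common_keys(data_list):
--     """Get common keys from a list of dictionaries."""
--     if not data_list:
--         return []
--     if any(not isinstance(item, dict) for item in data_list):
--         return []
--     counts = {}
--     for item in data_list:
--         for key in item.keys():
--             counts[key] = counts.get(key, 0) + 1
--     n = len(data_list)
--     return sorted(k for k, c in counts.items() if c == n)
-- ===== Notes on version B (the rewrite author's own statement) =====
-- stated objective: alternative
-- what changed: Replaces the repeated set-intersection loop by a single frequency-counting pass over all dict keys, then selects keys whose count equals len(data_list) and sorts them.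
import Mathlib
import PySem

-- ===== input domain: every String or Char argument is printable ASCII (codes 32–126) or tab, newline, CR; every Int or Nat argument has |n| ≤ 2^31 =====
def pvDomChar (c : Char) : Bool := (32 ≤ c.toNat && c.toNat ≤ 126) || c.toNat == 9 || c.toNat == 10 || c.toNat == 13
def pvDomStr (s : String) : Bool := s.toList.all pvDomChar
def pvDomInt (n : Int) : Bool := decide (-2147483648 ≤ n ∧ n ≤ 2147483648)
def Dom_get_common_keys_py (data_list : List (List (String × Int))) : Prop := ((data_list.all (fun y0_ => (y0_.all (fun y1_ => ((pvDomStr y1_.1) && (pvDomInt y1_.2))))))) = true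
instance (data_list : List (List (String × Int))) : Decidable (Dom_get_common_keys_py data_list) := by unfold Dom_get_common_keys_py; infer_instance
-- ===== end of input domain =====

-- B replaces A's repeated set-intersection by one key-frequency counting pass (alternative decomposition, same cost).


-- ===== PORT A =====
-- A's isinstance-dict branches can never take the non-dict arm here: the typed
-- domain makes every item a dict, so the 'common_keys = set(); break' arm is dead.
def get_common_keys_py (data_list : List (List (String × Int))) : List String :=
  match data_list with
  | [] => []
  | d0 :: rest =>
    let common_keys : PySem.Set String :=
      rest.foldl
        (fun s item => PySem.Set.inter s (PySem.Set.ofList (item.map Prod.fst)))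
        (PySem.Set.ofList (d0.map Prod.fst))
    PySem.List.sorted common_keys (fun x => x) false

-- ===== PORT B =====
-- B's any-non-dict guard is likewise dead in the typed domain. 'item.keys()' of a
-- Python dict yields its distinct keys, hence PySem.Set.ofList (item.map Prod.fst).
def get_common_keys_py_alt (data_list : List (List (String × Int))) : List String :=
  match data_list with
  | [] => []
  | _ :: _ =>
    let counts : PySem.Dict String Int :=
      data_list.foldl
        (fun d item =>
          (PySem.Set.ofList (item.map Prod.fst)).foldl
            (fun d key => d.modify key 0 (· + 1)) d)
        PySem.Dict.empty
    let n : Int := data_list.length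
    PySem.List.sorted ((counts.items.filter (fun p => p.2 == n)).map Prod.fst) (fun x => x) false

-- ===== PRECONDITION & SPEC =====
def Spec_get_common_keys_py (data_list : List (List (String × Int))) (out : List String) : Prop := out = get_common_keys_py_alt data_list
instance (data_list : List (List (String × Int))) (out : List String) : Decidable (Spec_get_common_keys_py data_list out) := by unfold Spec_get_common_keys_py; infer_instance

-- ===== CLAIM (what is proved, stated in full; the proofs are below) =====
def Claim_equal_get_common_keys_py : Prop := ∀ (data_list : List (List (String × Int))), Dom_get_common_keys_py data_list → Spec_get_common_keys_py data_list (get_common_keys_py data_list)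

-- ===== LEMMAS AND PROOFS =====

-- B's nested counting fold is Counter of the flattened (deduped-per-dict) key stream.
theorem counts_eq_counter (dl : List (List (String × Int))) (d : PySem.Dict String Int) :
    dl.foldl
      (fun d item =>
        (PySem.Set.ofList (item.map Prod.fst)).foldl
          (fun d key => d.modify key 0 (· + 1)) d) d
    = (dl.flatMap (fun item => PySem.Set.ofList (item.map Prod.fst))).foldl
        (fun d key => d.modify key 0 (· + 1)) d := by
  induction dl generalizing d with
  | nil => rfl
  | cons h t ih => simp [List.foldl_append, ih]

theorem count_flat (x : String) (dl : List (List (String × Int))) :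
    (dl.flatMap (fun item => PySem.Set.ofList (item.map Prod.fst))).count x
    = dl.countP (fun item => decide (x ∈ item.map Prod.fst)) := by
  induction dl with
  | nil => rfl
  | cons h t ih =>
    simp only [List.flatMap_cons, List.count_append, List.countP_cons, ih]
    by_cases hx : x ∈ h.map Prod.fst
    · rw [List.count_eq_one_of_mem (PySem.Set.nodup_ofList _) (by simpa [PySem.Set.mem_ofList] using hx)]
      simp [hx, Nat.add_comm]
    · rw [List.count_eq_zero_of_not_mem (by simpa [PySem.Set.mem_ofList] using hx)]
      simp [hx]

theorem mem_foldl_inter (x : String) (rest : List (List (String × Int))) (s : PySem.Set String) :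
    (x ∈ rest.foldl (fun s item => PySem.Set.inter s (PySem.Set.ofList (item.map Prod.fst))) s)
    ↔ (x ∈ s ∧ ∀ item ∈ rest, x ∈ item.map Prod.fst) := by
  induction rest generalizing s with
  | nil => simp
  | cons h t ih =>
    simp only [List.foldl_cons, ih, PySem.Set.mem_inter, PySem.Set.mem_ofList, List.mem_cons]
    constructor
    · rintro ⟨⟨hs, hh⟩, ht⟩
      exact ⟨hs, by rintro item (rfl | hm); exact hh; exact ht item hm⟩
    · rintro ⟨hs, hall⟩
      exact ⟨⟨hs, hall h (Or.inl rfl)⟩, fun item hm => hall item (Or.inr hm)⟩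

theorem nodup_foldl_inter (rest : List (List (String × Int))) (s : PySem.Set String)
    (hs : s.Nodup) :
    (rest.foldl (fun s item => PySem.Set.inter s (PySem.Set.ofList (item.map Prod.fst))) s).Nodup := by
  induction rest generalizing s with
  | nil => exact hs
  | cons h t ih =>
    simp only [List.foldl_cons]
    exact ih _ (PySem.Set.nodup_inter _ _ hs)

-- ===== VERDICT (by name: the statement is the Claim_ definition above) =====
theorem get_common_keys_py_spec : Claim_equal_get_common_keys_py := by
  intro data_list _
  unfold Spec_get_common_keys_py get_common_keys_py get_common_keys_py_alt
  match data_list with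
  | [] => rfl
  | d0 :: rest =>
    simp only [counts_eq_counter, ← PySem.Dict.counter_eq_foldl, PySem.Dict.items_counter,
      List.filter_map, List.map_map, Function.comp_def, List.map_id']
    rw [PySem.List.sorted_id_eq_sorted_id_iff_perm]
    set L := (d0 :: rest).flatMap (fun item => PySem.Set.ofList (item.map Prod.fst)) with hL
    apply (List.perm_ext_iff_of_nodup ?_ ?_).2
    · intro x
      rw [mem_foldl_inter, List.mem_filter, PySem.Set.mem_ofList, PySem.Set.mem_ofList]
      constructor
      · rintro ⟨h0, hall⟩
        have hallc : ∀ item ∈ (d0 :: rest), x ∈ item.map Prod.fst := by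
          intro item hm
          rcases List.mem_cons.mp hm with rfl | hm'
          · exact h0
          · exact hall item hm'
        refine ⟨?_, ?_⟩
        · rw [hL]; simp only [List.mem_flatMap]
          exact ⟨d0, List.mem_cons_self, by simpa [PySem.Set.mem_ofList] using h0⟩
        · have hc : L.count x = (d0 :: rest).length := by
            rw [hL, count_flat, List.countP_eq_length.2 (fun a ha => by simpa using hallc a ha)]
          simp [hc]
      · rintro ⟨hmem, hcnt⟩
        have hc : L.count x = (d0 :: rest).length := by
          have hc' : (L.count x : Int) = ((d0 :: rest).length : Int) := by
            have := of_decide_eq_true (by simpa [beq_iff_eq] using hcnt)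
            simpa using this
          exact_mod_cast hc'
        rw [hL, count_flat] at hc
        have hall := List.countP_eq_length.1 hc
        refine ⟨by simpa using hall d0 (List.mem_cons_self), fun item hm => by
          simpa using hall item (List.mem_cons_of_mem _ hm)⟩
    · exact nodup_foldl_inter _ _ (PySem.Set.nodup_ofList _)
    · exact List.Nodup.filter _ (PySem.Set.nodup_ofList _)
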